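-- pv_equiv track=rewrite | github.com/Anfany/Codility-Lessons-By-Python3 | L92_Tasks from Indeed Prime 2016 College Coders challenge/92.4_DiamondsCount.py | solution
-- ===== SOURCE A (Python) =====
-- def solution(X, Y):
--     """
--     给出平面上的点，得出满足条件的不同菱形的个数
--     :param X: 点的横坐标
--     :param Y: 点的纵坐标
--     :return: 不同菱形的个数
--     """
--     x_dict = {}  # 横坐标为键，纵坐标为值的字典
--     y_dict = {}  # 纵坐标为键，横坐标为值的字典
--
--     for x, y in zip(X, Y):
--         if x in x_dict:
--             x_dict[x].append(y)
--         else: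
--             x_dict[x] = [y]
--
--         if y in y_dict:
--             y_dict[y].append(x)
--         else:
--             y_dict[y] = [x]
--     #  不同的x或者y都必须大于2个，才可能组成满足条件的菱形
--     if len(x_dict) <= 2 or len(y_dict) <= 2:
--         return 0
--
--     #  开始判断是否可以构成菱形
--     count = 0
--     for i in x_dict:  # 遍历横坐标
--         point_count = x_dict[i]  # 这个横坐标上的点最少为2个，才可能构建菱形
--         if len(point_count) >= 2:
--             for o in range(len(point_count) - 1):
--                 for t in range(o + 1, len(point_count)):
--                     y_sum = point_count[o] + point_count[t]  # 开始计算纵坐标的均值，需要为整数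
--                     if y_sum % 2 == 0:
--                         y_value = y_sum // 2
--                         if y_value in y_dict:  # 纵坐标存在
--                             y_point = y_dict[y_value]  # 该纵坐标对应的横坐标序列
--                             if len(y_point) >= 2:  # 这个纵坐标上的点也最少也为2个
--                                 sort_y_point = sorted(y_point)
--                                 min_num = sort_y_point[0]
--                                 max_num = sort_y_point[-1]
--                                 if min_num < i < max_num:  # 横坐标i因为是均值，因此需要在这个序列的最大最小值之间
--                                     for j in sort_y_point:
--                                         if j < i:
--                                             if 2 * i - j in sort_y_point:  # 纵坐标对应的2个横坐标的均值恰好为i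
--                                                 count += 1
--                                         else:  # 因为sort_y_point是升序的，一旦大于i，后面的就不可能了
--                                             break
--     return count
-- ===== SOURCE B (Python) =====
-- def solution(X, Y):
--     """
--     Count the diamonds by grouping: one pass counts, per center point, the
--     vertical point-pairs centered there; a second pass multiplies each center's
--     vertical-pair count by its horizontal mirror count.
--     """
--     cols = {}  # x -> list of y's on that column
--     rows = {}  # y -> list of x's on that row
--     for x, y in zip(X, Y):
--         cols.setdefault(x, []).append(y)
--         rows.setdefault(y, []).append(x)
--     if len(cols) <= 2 or len(rows) <= 2:
--         return 0
--
--     # pass 1: vcount[(x, yc)] = number of index-pairs of points on column x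
--     # whose vertical midpoint is the lattice point (x, yc)
--     vcount = {}
--     for x, ys in cols.items():
--         n = len(ys)
--         for o in range(n - 1):
--             for t in range(o + 1, n):
--                 s = ys[o] + ys[t]
--                 if s % 2 == 0:
--                     key = (x, s // 2)
--                     vcount[key] = vcount.get(key, 0) + 1
--
--     # pass 2: for each distinct center, count horizontal mirror pairs once
--     total = 0
--     for (cx, cy), v in vcount.items():
--         row = rows.get(cy)
--         if row is None:
--             continue
--         mirror = set(row)
--         h = sum(1 for j in row if j < cx and 2 * cx - j in mirror)
--         total += v * h
--     return total
-- ===== Notes on version B (the rewrite author's own statement) =====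
-- stated objective: alternative
-- what changed: Instead of recomputing the horizontal mirror scan inside the nested vertical-pair loops, B counts vertical pairs per distinct center into a dictionary in one pass and then performs a single horizontal scan per distinct center, joining the two counts by multiplication.
import Mathlib
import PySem

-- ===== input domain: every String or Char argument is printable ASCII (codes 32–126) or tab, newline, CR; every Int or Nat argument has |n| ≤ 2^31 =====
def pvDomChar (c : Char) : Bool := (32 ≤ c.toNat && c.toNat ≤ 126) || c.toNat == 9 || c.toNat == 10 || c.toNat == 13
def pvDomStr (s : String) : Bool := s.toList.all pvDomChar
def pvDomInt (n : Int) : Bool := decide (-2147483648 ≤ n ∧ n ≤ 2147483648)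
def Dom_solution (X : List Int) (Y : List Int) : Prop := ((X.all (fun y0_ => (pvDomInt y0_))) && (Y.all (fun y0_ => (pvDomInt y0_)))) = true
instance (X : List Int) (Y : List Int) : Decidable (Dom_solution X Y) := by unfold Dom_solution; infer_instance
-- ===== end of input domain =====

-- B replaces A's recomputation of the horizontal mirror scan inside the nested
-- vertical-pair loops by a two-pass join: count vertical pairs per distinct center
-- in a dictionary, then one horizontal scan per distinct center (objective: alternative).

-- ===== PORT A =====
-- the two index dictionaries (x -> ys on that column, y -> xs on that row)
def solnBuild (X Y : List Int) : PySem.Dict Int (List Int) × PySem.Dict Int (List Int) :=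
  (X.zip Y).foldl (fun s xy =>
      let xd := if s.1.contains xy.1 then s.1.insert xy.1 (s.1.getD xy.1 [] ++ [xy.2])
                else s.1.insert xy.1 [xy.2]
      let yd := if s.2.contains xy.2 then s.2.insert xy.2 (s.2.getD xy.2 [] ++ [xy.1])
                else s.2.insert xy.2 [xy.1]
      (xd, yd)) (PySem.Dict.empty, PySem.Dict.empty)

-- A's inner `for j in sort_y_point: … break` loop (counts mirrors, breaks at j ≥ i)
def solnJLoop (full : List Int) (i : Int) : List Int → Int → Int
  | [], c => c
  | j :: rest, c =>
    if j < i then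
      if full.contains (2 * i - j) then solnJLoop full i rest (c + 1)
      else solnJLoop full i rest c
    else c

-- A's counting loop over the x-dictionary
def solnCount (xd yd : PySem.Dict Int (List Int)) : Int :=
  xd.keys.foldl (fun count i =>
    let pc := xd.getD i []
    if 2 ≤ pc.length then
      (PySem.List.pyRange 0 ((pc.length : Int) - 1) 1).foldl (fun count o =>
        (PySem.List.pyRange (o + 1) (pc.length : Int) 1).foldl (fun count t =>
          let ysum := PySem.List.pyGetD pc o 0 + PySem.List.pyGetD pc t 0
          if PySem.Int.mod ysum 2 = 0 then
            let yv := PySem.Int.floordiv ysum 2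
            if yd.contains yv then
              let yp := yd.getD yv []
              if 2 ≤ yp.length then
                let srt := PySem.List.sorted yp (fun z => z)
                let mn := PySem.List.pyGetD srt 0 0
                let mx := PySem.List.pyGetD srt (-1) 0
                if mn < i ∧ i < mx then solnJLoop srt i srt count else count
              else count
            else count
          else count) count) count
    else count) 0

def solution (X : List Int) (Y : List Int) : Int :=
  let p := solnBuild X Y
  if p.1.size ≤ 2 ∨ p.2.size ≤ 2 then 0 else solnCount p.1 p.2

-- ===== PORT B =====
-- the same two index dictionaries, built with dict.setdefault
def altBuild (X Y : List Int) : PySem.Dict Int (List Int) × PySem.Dict Int (List Int) :=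
  (X.zip Y).foldl (fun s xy =>
      (s.1.modify xy.1 [] (· ++ [xy.2]), s.2.modify xy.2 [] (· ++ [xy.1])))
    (PySem.Dict.empty, PySem.Dict.empty)

-- pass 1: vcount[(x, yc)] = number of vertical index-pairs on column x centered at (x, yc)
def altVcount (cols : PySem.Dict Int (List Int)) : PySem.Dict (Int × Int) Int :=
  cols.items.foldl (fun d kv =>
    (PySem.List.pyRange 0 ((kv.2.length : Int) - 1) 1).foldl (fun d o =>
      (PySem.List.pyRange (o + 1) (kv.2.length : Int) 1).foldl (fun d t =>
        let s := PySem.List.pyGetD kv.2 o 0 + PySem.List.pyGetD kv.2 t 0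
        if PySem.Int.mod s 2 = 0 then
          let key := (kv.1, PySem.Int.floordiv s 2)
          d.insert key (d.getD key 0 + 1)
        else d) d) d) PySem.Dict.empty

-- pass 2: join each distinct center's vertical-pair count with one horizontal scan
def altTotal (rows : PySem.Dict Int (List Int)) (vcount : PySem.Dict (Int × Int) Int) : Int :=
  vcount.items.foldl (fun total kv =>
    match rows.get? kv.1.2 with
    | none => total
    | some row =>
      let mirror := PySem.Set.ofList row
      let h := (row.countP (fun j => j < kv.1.1 && mirror.contains (2 * kv.1.1 - j)) : Int)
      total + kv.2 * h) 0

def solution_alt (X : List Int) (Y : List Int) : Int :=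
  let p := altBuild X Y
  if p.1.size ≤ 2 ∨ p.2.size ≤ 2 then 0 else altTotal p.2 (altVcount p.1)

-- ===== PRECONDITION & SPEC =====
def Spec_solution (X : List Int) (Y : List Int) (out : Int) : Prop := out = solution_alt X Y
instance (X : List Int) (Y : List Int) (out : Int) : Decidable (Spec_solution X Y out) := by unfold Spec_solution; infer_instance

-- ===== CLAIM (what is proved, stated in full; the proofs are below) =====
def Claim_equal_solution : Prop := ∀ (X : List Int) (Y : List Int), Dom_solution X Y → Spec_solution X Y (solution X Y)

-- ===== LEMMAS AND PROOFS =====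

-- the optional midpoint of the pair of y-values at indices o, t
def pvCenter? (ys : List Int) (o t : Int) : Option Int :=
  if PySem.Int.mod (PySem.List.pyGetD ys o 0 + PySem.List.pyGetD ys t 0) 2 = 0 then
    some (PySem.Int.floordiv (PySem.List.pyGetD ys o 0 + PySem.List.pyGetD ys t 0) 2)
  else none

-- all integer midpoints of vertical index-pairs of a column, in loop order
def pvCenters (ys : List Int) : List Int :=
  (PySem.List.pyRange 0 ((ys.length : Int) - 1) 1).flatMap (fun o =>
    (PySem.List.pyRange (o + 1) (ys.length : Int) 1).filterMap (pvCenter? ys o))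

-- B's per-center horizontal mirror count
def pvHB (rows : PySem.Dict Int (List Int)) (i c : Int) : Int :=
  match rows.get? c with
  | none => 0
  | some row => (row.countP (fun j => j < i && (PySem.Set.ofList row).contains (2 * i - j)) : Int)

-- A's per-pair contribution, as a function of the center
def pvGA (yd : PySem.Dict Int (List Int)) (i c : Int) : Int :=
  if yd.contains c then
    let yp := yd.getD c []
    if 2 ≤ yp.length then
      let srt := PySem.List.sorted yp (fun z => z)
      if PySem.List.pyGetD srt 0 0 < i ∧ i < PySem.List.pyGetD srt (-1) 0 then
        solnJLoop srt i srt 0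
      else 0
    else 0
  else 0

def pvInc (d : PySem.Dict (Int × Int) Int) (k : Int × Int) : PySem.Dict (Int × Int) Int :=
  d.insert k (d.getD k 0 + 1)

-- the flat multiset of (column, center) keys B's first pass counts
def pvAllKeys (cols : PySem.Dict Int (List Int)) : List (Int × Int) :=
  cols.items.flatMap (fun kv => (pvCenters kv.2).map (fun c => (kv.1, c)))

lemma pv_ite_modify (d : PySem.Dict Int (List Int)) (k v : Int) :
    (if d.contains k then d.insert k (d.getD k [] ++ [v]) else d.insert k [v])
      = d.modify k [] (· ++ [v]) := by
  have hm : d.modify k [] (· ++ [v]) = d.insert k (d.getD k [] ++ [v]) := rfl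
  rw [hm]
  by_cases h : d.contains k = true
  · rw [if_pos h]
  · rw [if_neg h, PySem.Dict.getD_of_not_contains d [] (by simpa using h)]
    rfl

lemma pv_build_eq (X Y : List Int) : solnBuild X Y = altBuild X Y := by
  unfold solnBuild altBuild
  apply PySem.List.foldl_congr_mem
  intro s xy _
  show (_, _) = _
  rw [pv_ite_modify s.1 xy.1 xy.2, pv_ite_modify s.2 xy.2 xy.1]

lemma pv_sum_flatMap {α β : Type} (f : α → List β) (l : List α) (g : β → Int) :
    ((l.flatMap f).map g).sum = (l.map (fun x => ((f x).map g).sum)).sum := by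
  rw [List.map_flatMap, List.flatMap_def, List.sum_flatten, List.map_map]; rfl

lemma pv_jloop_eq (full : List Int) (i : Int) : ∀ (l : List Int) (c : Int),
    solnJLoop full i l c
      = c + (((l.takeWhile (fun j => decide (j < i))).countP (fun j => full.contains (2 * i - j)) : Nat) : Int) := by
  intro l
  induction l with
  | nil => intro c; simp [solnJLoop]
  | cons j rest ih =>
    intro c
    by_cases h : j < i
    · by_cases hm : full.contains (2 * i - j) = true
      · simp only [solnJLoop, ih, List.takeWhile_cons, h, hm]
        simp only [decide_true, if_true, List.countP_cons, hm]
        push_cast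
        ring
      · have hm' : full.contains (2 * i - j) = false := by simpa using hm
        simp only [solnJLoop, ih, List.takeWhile_cons, h, hm']
        simp only [decide_true, if_true, List.countP_cons, hm']
        simp
    · have hpa : (decide (j < i)) = false := by simpa using h
      simp only [solnJLoop, if_neg h, List.takeWhile_cons, hpa]
      simp

lemma pv_takeWhile_lt (i : Int) : ∀ (l : List Int), List.Pairwise (· ≤ ·) l →
    l.takeWhile (fun j => decide (j < i)) = l.filter (fun j => decide (j < i)) := by
  intro l hl
  induction l with
  | nil => rfl
  | cons a t ih =>
    rcases List.pairwise_cons.mp hl with ⟨ha, ht⟩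
    by_cases h : a < i
    · simp [List.filter_cons, h, ih ht]
    · have hpa : (decide (a < i)) = false := by simpa using h
      rw [List.takeWhile_cons, List.filter_cons, hpa]
      simp only [Bool.false_eq_true, if_false]
      symm
      rw [List.filter_eq_nil_iff]
      intro x hx
      simp only [decide_eq_true_eq]
      exact fun hxi => h (lt_of_le_of_lt (ha x hx) hxi)

lemma pv_head_le (l : List Int) (h : List.Pairwise (· ≤ ·) l) (x : Int) (hx : x ∈ l) (hne : l ≠ []) :
    l.head hne ≤ x := by
  cases l with
  | nil => simp at hx
  | cons a t =>
    rcases List.pairwise_cons.mp h with ⟨ha, _⟩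
    rcases List.mem_cons.mp hx with rfl | hx
    · simp
    · simpa using ha x hx

lemma pv_le_getLast : ∀ (l : List Int), List.Pairwise (· ≤ ·) l → ∀ (x : Int), x ∈ l → ∀ (hne : l ≠ []),
    x ≤ l.getLast hne := by
  intro l
  induction l with
  | nil => intro _ x hx; simp at hx
  | cons a t ih =>
    intro h x hx hne
    rcases List.pairwise_cons.mp h with ⟨ha, ht⟩
    cases t with
    | nil => simp at hx; simp [hx]
    | cons b u =>
      rcases List.mem_cons.mp hx with rfl | hx
      · calc x ≤ b := ha b (by simp)
          _ ≤ (b :: u).getLast (by simp) := ih ht b (by simp) (by simp)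
          _ = (x :: b :: u).getLast hne := (List.getLast_cons (by simp)).symm
      · calc x ≤ (b :: u).getLast (by simp) := ih ht x hx (by simp)
          _ = (a :: b :: u).getLast hne := (List.getLast_cons (by simp)).symm

lemma pv_pyGetD_zero (l : List Int) (d : Int) (h : l ≠ []) :
    PySem.List.pyGetD l 0 d = l.head h := by
  cases l with
  | nil => exact absurd rfl h
  | cons a t => simp [PySem.List.pyGetD, PySem.List.pyGet?, PySem.List.pyIdx?]

lemma pv_ga_eq_hb (yd : PySem.Dict Int (List Int)) (i c : Int) :
    pvGA yd i c = pvHB yd i c := by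
  unfold pvGA pvHB
  cases hg : yd.get? c with
  | none =>
    have hc : yd.contains c = false := (PySem.Dict.get?_eq_none_iff_contains yd c).mp hg
    rw [hc]
    simp
  | some yp =>
    have hc : yd.contains c = true := by
      rw [PySem.Dict.contains_eq_isSome_get?, hg]
      rfl
    have hD : yd.getD c [] = yp := PySem.Dict.getD_of_get?_eq_some yd [] hg
    rw [hc, if_pos rfl, hD]
    dsimp only []
    have hperm : (PySem.List.sorted yp (fun z => z)).Perm yp := PySem.List.sorted_perm yp _ false
    have hpw : List.Pairwise (· ≤ ·) (PySem.List.sorted yp (fun z => z)) := by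
      simpa using PySem.List.sorted_pairwise yp (fun z => z)
    have hsetc : ∀ z : Int, ((PySem.Set.ofList yp).contains z) = yp.contains z := by
      intro z
      by_cases hz : z ∈ yp
      · simp [hz, PySem.Set.mem_ofList]
      · simp [hz, PySem.Set.mem_ofList]
    by_cases hlen : 2 ≤ yp.length
    · rw [if_pos hlen]
      by_cases hg2 : PySem.List.pyGetD (PySem.List.sorted yp (fun z => z)) 0 0 < i ∧
          i < PySem.List.pyGetD (PySem.List.sorted yp (fun z => z)) (-1) 0
      · rw [if_pos hg2, pv_jloop_eq, zero_add]
        congr 1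
        rw [pv_takeWhile_lt i _ hpw, List.countP_filter, hperm.countP_eq]
        apply List.countP_congr
        intro j hj
        have hcc : (PySem.List.sorted yp (fun z => z)).contains (2 * i - j) = yp.contains (2 * i - j) := by
          by_cases hz : (2 * i - j) ∈ yp
          · simp [hz, hperm.mem_iff.mpr hz]
          · simp [hz, fun hh => hz (hperm.mem_iff.mp hh)]
        rw [hcc, hsetc, Bool.and_comm]
      · rw [if_neg hg2]
        have hz : yp.countP (fun j => decide (j < i) && (PySem.Set.ofList yp).contains (2 * i - j)) = 0 := by
          rw [List.countP_eq_zero]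
          intro j hj hp
          rw [hsetc, Bool.and_eq_true, decide_eq_true_eq, List.contains_eq_mem, decide_eq_true_eq] at hp
          obtain ⟨hji, hmem⟩ := hp
          have hne : PySem.List.sorted yp (fun z => z) ≠ [] := by
            have := hperm.length_eq
            intro hnil
            rw [hnil] at this
            simp at this
            omega
          have h0 : PySem.List.pyGetD (PySem.List.sorted yp (fun z => z)) 0 0
              = (PySem.List.sorted yp (fun z => z)).head hne := pv_pyGetD_zero _ 0 hne
          have hlast : PySem.List.pyGetD (PySem.List.sorted yp (fun z => z)) (-1) 0
              = (PySem.List.sorted yp (fun z => z)).getLast hne := PySem.List.pyGetD_neg_one _ 0 hne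
          apply hg2
          constructor
          · rw [h0]
            have := pv_head_le _ hpw j (hperm.mem_iff.mpr hj) hne
            omega
          · rw [hlast]
            have := pv_le_getLast _ hpw (2 * i - j) (hperm.mem_iff.mpr hmem) hne
            omega
        rw [hz]
        simp
    · rw [if_neg hlen]
      match yp, hlen with
      | [], _ => simp
      | [a], _ =>
        simp only [List.countP_cons, List.countP_nil]
        have hsa : PySem.Set.ofList [a] = [a] := PySem.Set.ofList_eq_self_of_nodup [a] (List.nodup_singleton a)
        have hf : (decide (a < i) && (PySem.Set.ofList [a]).contains (2 * i - a)) = false := by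
          by_cases ha : a < i
          · have hne : ¬ ((2 * i - a) = a) := by omega
            rw [hsa]
            simp [hne]
          · simp [ha]
        simp [hf]
        omega
      | a :: b :: t, hlen => exact absurd (by simp) hlen
lemma pv_inner_eq (xd yd : PySem.Dict Int (List Int)) (i : Int) (o : Int) (count : Int) :
    (PySem.List.pyRange (o + 1) ((xd.getD i []).length : Int) 1).foldl (fun count t =>
        let ysum := PySem.List.pyGetD (xd.getD i []) o 0 + PySem.List.pyGetD (xd.getD i []) t 0
        if PySem.Int.mod ysum 2 = 0 then
          let yv := PySem.Int.floordiv ysum 2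
          if yd.contains yv then
            let yp := yd.getD yv []
            if 2 ≤ yp.length then
              let srt := PySem.List.sorted yp (fun z => z)
              let mn := PySem.List.pyGetD srt 0 0
              let mx := PySem.List.pyGetD srt (-1) 0
              if mn < i ∧ i < mx then solnJLoop srt i srt count else count
            else count
          else count
        else count) count
    = count + (((PySem.List.pyRange (o + 1) ((xd.getD i []).length : Int) 1).filterMap (pvCenter? (xd.getD i []) o)).map (fun c => pvGA yd i c)).sum := by
  rw [← PySem.List.foldl_add]
  rw [List.foldl_filterMap]
  apply PySem.List.foldl_congr_mem
  intro acc t _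
  unfold pvCenter?
  by_cases h : PySem.Int.mod (PySem.List.pyGetD (xd.getD i []) o 0 + PySem.List.pyGetD (xd.getD i []) t 0) 2 = 0
  · rw [if_pos h, if_pos h]
    show _ = acc + pvGA yd i _
    unfold pvGA
    dsimp only []
    split_ifs
    all_goals try ring
    all_goals (rw [pv_jloop_eq, pv_jloop_eq]; ring)
  · rw [if_neg h, if_neg h]

lemma pv_count_eq (xd yd : PySem.Dict Int (List Int)) :
    solnCount xd yd
      = (xd.keys.map (fun i => ((pvCenters (xd.getD i [])).map (fun c => pvGA yd i c)).sum)).sum := by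
  unfold solnCount
  conv_rhs => rw [← zero_add ((xd.keys.map (fun i => ((pvCenters (xd.getD i [])).map (fun c => pvGA yd i c)).sum)).sum)]
  rw [← PySem.List.foldl_add]
  apply PySem.List.foldl_congr_mem
  intro count i _
  by_cases hlen : 2 ≤ (xd.getD i []).length
  · rw [if_pos hlen]
    have hmid : ∀ (count : Int),
        (PySem.List.pyRange 0 (((xd.getD i []).length : Int) - 1) 1).foldl (fun count o =>
          (PySem.List.pyRange (o + 1) ((xd.getD i []).length : Int) 1).foldl (fun count t =>
            let ysum := PySem.List.pyGetD (xd.getD i []) o 0 + PySem.List.pyGetD (xd.getD i []) t 0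
            if PySem.Int.mod ysum 2 = 0 then
              let yv := PySem.Int.floordiv ysum 2
              if yd.contains yv then
                let yp := yd.getD yv []
                if 2 ≤ yp.length then
                  let srt := PySem.List.sorted yp (fun z => z)
                  let mn := PySem.List.pyGetD srt 0 0
                  let mx := PySem.List.pyGetD srt (-1) 0
                  if mn < i ∧ i < mx then solnJLoop srt i srt count else count
                else count
              else count
            else count) count) count
        = count + ((pvCenters (xd.getD i [])).map (fun c => pvGA yd i c)).sum := by
      intro count
      rw [PySem.List.foldl_congr_mem _ _
        (fun count o => count + (((PySem.List.pyRange (o + 1) ((xd.getD i []).length : Int) 1).filterMap (pvCenter? (xd.getD i []) o)).map (fun c => pvGA yd i c)).sum) _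
        (by intro acc o _; exact pv_inner_eq xd yd i o acc)]
      rw [PySem.List.foldl_add]
      congr 1
      unfold pvCenters
      rw [pv_sum_flatMap]
    exact hmid count
  · rw [if_neg hlen]
    have hnil : pvCenters (xd.getD i []) = [] := by
      unfold pvCenters
      rw [PySem.List.pyRange_one_eq_nil (by omega)]
      rfl
    rw [hnil]
    simp
lemma pv_vcount_eq (cols : PySem.Dict Int (List Int)) :
    altVcount cols = PySem.Dict.counter (pvAllKeys cols) := by
  rw [← PySem.Dict.foldl_insert_getD_add_one_eq_counter]
  unfold pvAllKeys
  rw [List.foldl_flatMap]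
  unfold altVcount
  apply PySem.List.foldl_congr_mem
  intro d kv _
  rw [List.foldl_map]
  unfold pvCenters
  rw [List.foldl_flatMap]
  apply PySem.List.foldl_congr_mem
  intro d o _
  rw [List.foldl_filterMap]
  apply PySem.List.foldl_congr_mem
  intro d t _
  unfold pvCenter?
  by_cases h : PySem.Int.mod (PySem.List.pyGetD kv.2 o 0 + PySem.List.pyGetD kv.2 t 0) 2 = 0
  · rw [if_pos h, if_pos h]
  · rw [if_neg h, if_neg h]
lemma pv_discard_cons (a x : Int × Int) (S : List (Int × Int)) :
    PySem.Set.discard (a :: S) x = if a = x then PySem.Set.discard S x else a :: PySem.Set.discard S x := by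
  simp only [PySem.Set.discard, List.filter_cons]
  by_cases h : a = x <;> simp [h]

lemma pv_sum_discard (x : Int × Int) (g : Int × Int → Int) :
    ∀ (S : List (Int × Int)), S.Nodup →
      (S.map g).sum = (((PySem.Set.discard S x).map g).sum) + (if x ∈ S then g x else 0) := by
  intro S
  induction S with
  | nil => intro _; simp [PySem.Set.discard]
  | cons a t ih =>
    intro hnd
    rcases List.nodup_cons.mp hnd with ⟨hat, hnt⟩
    rw [pv_discard_cons]
    by_cases h : a = x
    · subst h
      simp only [if_pos rfl, List.mem_cons, true_or, if_pos, List.map_cons, List.sum_cons]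
      rw [ih hnt, if_neg hat]
      ring
    · have hxa : (if x ∈ a :: t then g x else 0) = (if x ∈ t then g x else 0) := by
        by_cases hx : x ∈ t
        · simp [List.mem_cons, hx]
        · simp [List.mem_cons, hx, Ne.symm h]
      simp only [if_neg h, List.map_cons, List.sum_cons]
      rw [ih hnt, hxa]
      ring

lemma pv_sumcount (f : Int × Int → Int) : ∀ (l : List (Int × Int)),
    ((PySem.Set.ofList l).map (fun k => ((l.count k : Nat) : Int) * f k)).sum = (l.map f).sum := by
  intro l
  induction l with
  | nil => simp [PySem.Set.ofList]
  | cons x xs ih =>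
    rw [PySem.Set.ofList_cons, List.map_cons, List.sum_cons, List.map_cons, List.sum_cons]
    have hmapeq : (PySem.Set.discard (PySem.Set.ofList xs) x).map (fun k => (((x :: xs).count k : Nat) : Int) * f k)
        = (PySem.Set.discard (PySem.Set.ofList xs) x).map (fun k => ((xs.count k : Nat) : Int) * f k) := by
      apply List.map_congr_left
      intro k hk
      have hkx : k ≠ x := (PySem.Set.mem_discard _ _ _ |>.mp hk).2
      simp only [List.count_cons]
      have : ¬ (x == k) = true := by simpa using (Ne.symm hkx)
      simp [this]
    rw [hmapeq]
    have hdisc := pv_sum_discard x (fun k => ((xs.count k : Nat) : Int) * f k) (PySem.Set.ofList xs) (PySem.Set.nodup_ofList xs)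
    have hd : ((PySem.Set.discard (PySem.Set.ofList xs) x).map (fun k => ((xs.count k : Nat) : Int) * f k)).sum
        = ((PySem.Set.ofList xs).map (fun k => ((xs.count k : Nat) : Int) * f k)).sum
          - (if x ∈ PySem.Set.ofList xs then ((xs.count x : Nat) : Int) * f x else 0) := by
      rw [hdisc]; ring
    rw [hd, ih]
    rw [List.count_cons_self]
    by_cases hx : x ∈ xs
    · rw [if_pos ((PySem.Set.mem_ofList xs x).mpr hx)]
      push_cast
      ring
    · rw [if_neg (fun hh => hx ((PySem.Set.mem_ofList xs x).mp hh)), List.count_eq_zero.mpr hx]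
      push_cast
      ring

lemma pv_total_eq (rows : PySem.Dict Int (List Int)) (l : List (Int × Int)) :
    altTotal rows (PySem.Dict.counter l) = (l.map (fun k => pvHB rows k.1 k.2)).sum := by
  unfold altTotal
  have hbody : ∀ (total : Int), ∀ kv ∈ (PySem.Dict.counter l).items,
      (match rows.get? kv.1.2 with
        | none => total
        | some row =>
          total + kv.2 * ((row.countP (fun j => j < kv.1.1 && (PySem.Set.ofList row).contains (2 * kv.1.1 - j)) : Nat) : Int))
      = total + kv.2 * pvHB rows kv.1.1 kv.1.2 := by
    intro total kv _
    unfold pvHB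
    cases h : rows.get? kv.1.2 with
    | none => simp
    | some row => simp
  rw [PySem.List.foldl_congr_mem _ _ (fun total kv => total + kv.2 * pvHB rows kv.1.1 kv.1.2) _ hbody]
  rw [PySem.List.foldl_add]
  rw [PySem.Dict.items_counter, List.map_map]
  rw [zero_add]
  exact pv_sumcount (fun k => pvHB rows k.1 k.2) l
lemma pv_main (X Y : List Int) : solution X Y = solution_alt X Y := by
  unfold solution solution_alt
  dsimp only []
  rw [pv_build_eq]
  by_cases hsz : (altBuild X Y).1.size ≤ 2 ∨ (altBuild X Y).2.size ≤ 2
  · rw [if_pos hsz, if_pos hsz]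
  · rw [if_neg hsz, if_neg hsz]
    rw [pv_count_eq, pv_vcount_eq, pv_total_eq]
    unfold pvAllKeys
    rw [pv_sum_flatMap]
    have hnod : (altBuild X Y).1.keys.Nodup := by
      unfold altBuild
      rw [PySem.List.foldl_prod_mk
        (f := fun (d : PySem.Dict Int (List Int)) (xy : Int × Int) => d.modify xy.1 [] (· ++ [xy.2]))
        (g := fun (d : PySem.Dict Int (List Int)) (xy : Int × Int) => d.modify xy.2 [] (· ++ [xy.1]))]
      exact PySem.Dict.nodup_keys_foldl_modify_key (X.zip Y) Prod.fst []
        (fun _ xy => (· ++ [xy.2])) PySem.Dict.empty PySem.Dict.nodup_keys_empty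
    rw [PySem.Dict.items_eq_map_keys _ hnod [], List.map_map]
    apply congrArg List.sum
    apply List.map_congr_left
    intro k hk
    simp only [Function.comp_apply]
    rw [List.map_map]
    apply congrArg List.sum
    apply List.map_congr_left
    intro c' hc'
    exact pv_ga_eq_hb (altBuild X Y).2 k c'

-- ===== VERDICT (by name: the statement is the Claim_ definition above) =====
theorem solution_spec : Claim_equal_solution := by
  intro X Y _
  unfold Spec_solution
  exact pv_main X Y
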